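-- pv_equiv track=rewrite | github.com/MrDarklake/Algorithm-Studies | Algorithm-Studies/python_lab/enUzunArtanListe.py | EnUzunArtanListe
-- ===== SOURCE A (Python) =====
-- def EnUzunArtanListe(liste):
--     en_uzun = 0
--     en_uzun_liste = []
--     long = len(liste)
--     Artan_Listeler = []
--     temp_list =[liste[0]]
--     for i in range(1,long):
--         if liste[i] > liste[i-1]:
--             temp_list.append(liste[i])
--         else:
--             if len(temp_list) > 1:
--                 Artan_Listeler.append(temp_list.copy())
--             temp_list = [liste[i]]
--     Artan_Listeler.append(temp_list.copy())
--     en_uzun = len(Artan_Listeler[0])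
--     for i in Artan_Listeler:
--         if en_uzun < len(i):
--             en_uzun = len(i)
--             en_uzun_liste.append(i)
--     for i in Artan_Listeler:
--         if (i not in en_uzun_liste)  and  (len(i) == en_uzun) :
--             en_uzun_liste.append(i)
--
--
--     return en_uzun_liste
-- ===== SOURCE B (Python) =====
-- def EnUzunArtanListe(liste):
--     n = len(liste)
--     breaks = [0] + [i for i in range(1, n) if liste[i] <= liste[i - 1]] + [n]
--     segs = [liste[a:b] for a, b in zip(breaks, breaks[1:])]
--     runs = [s for s in segs[:-1] if len(s) > 1] + [segs[-1]]
--     best, result = len(runs[0]), []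
--     for r in runs:
--         if len(r) > best:
--             best, result = len(r), result + [r]
--     seen = {tuple(r) for r in result}
--     for r in runs:
--         if len(r) == best and tuple(r) not in seen:
--             result.append(r)
--             seen.add(tuple(r))
--     return result
-- ===== Notes on version B (the rewrite author's own statement) =====
-- stated objective: alternative
-- what changed: Runs are obtained by computing break positions and slicing instead of an element-accumulating state machine, and the final duplicate check uses a set of tuples with incremental insertion instead of 'run not in result' list scans; it trades A's worst-case quadratic membership scans for set lookups, though on random inputs the cost is the same.
import Mathlib
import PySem

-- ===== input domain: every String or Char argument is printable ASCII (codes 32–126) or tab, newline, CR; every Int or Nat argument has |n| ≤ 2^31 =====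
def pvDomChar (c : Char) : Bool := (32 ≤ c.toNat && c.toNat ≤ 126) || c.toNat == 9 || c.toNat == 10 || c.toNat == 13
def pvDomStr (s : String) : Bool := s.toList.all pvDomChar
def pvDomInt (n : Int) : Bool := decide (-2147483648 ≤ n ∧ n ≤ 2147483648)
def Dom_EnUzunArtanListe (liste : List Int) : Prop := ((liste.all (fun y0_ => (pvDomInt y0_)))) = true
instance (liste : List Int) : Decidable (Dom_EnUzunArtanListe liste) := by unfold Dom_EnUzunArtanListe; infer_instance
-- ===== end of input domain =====

-- B replaces A's element-accumulating run state machine by break positions + slices,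
-- and the 'run not in result' list scans by a set of tuples (objective: alternative).

-- ===== PORT A =====
-- loop body of A's first 'for i in range(1, long)' loop (state = (Artan_Listeler, temp_list))
def pvStepA (liste : List Int) (st : List (List Int) × List Int) (i : Int) : List (List Int) × List Int :=
  if PySem.List.pyGetD liste i 0 > PySem.List.pyGetD liste (i - 1) 0 then
    (st.1, st.2 ++ [PySem.List.pyGetD liste i 0])
  else if st.2.length > 1 then
    (st.1 ++ [st.2], [PySem.List.pyGetD liste i 0])
  else
    (st.1, [PySem.List.pyGetD liste i 0])

-- loop body of A's second loop (state = (en_uzun, en_uzun_liste))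
def pvStep2A (st : Int × List (List Int)) (r : List Int) : Int × List (List Int) :=
  if st.1 < (r.length : Int) then ((r.length : Int), st.2 ++ [r]) else st

-- loop body of A's third loop (en_uzun_liste accumulator; 'i not in en_uzun_liste' is list membership)
def pvStep3A (en : Int) (acc : List (List Int)) (r : List Int) : List (List Int) :=
  if ¬ r ∈ acc ∧ (r.length : Int) = en then acc ++ [r] else acc

def EnUzunArtanListe (liste : List Int) : List (List Int) :=
  match liste with
  | [] => []   -- Python: liste[0] raises IndexError; excluded by Pre_
  | x0 :: _ =>
    let long : Int := liste.length
    let s := (PySem.List.pyRange 1 long 1).foldl (pvStepA liste) ([], [x0])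
    let artan := s.1 ++ [s.2]
    -- Artan_Listeler is nonempty here, so Artan_Listeler[0] cannot fail: headD is exact
    let s2 := artan.foldl pvStep2A (((artan.headD []).length : Int), [])
    artan.foldl (pvStep3A s2.1) s2.2

-- ===== PORT B =====
-- loop body of B's 'if len(r) > best' loop (state = (best, result))
def pvStep2B (st : Nat × List (List Int)) (r : List Int) : Nat × List (List Int) :=
  if st.1 < r.length then (r.length, st.2 ++ [r]) else st

-- loop body of B's final loop (state = (result, seen)); seen is a Python set
def pvStep3B (best : Nat) (st : List (List Int) × PySem.Set (List Int)) (r : List Int) :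
    List (List Int) × PySem.Set (List Int) :=
  if r.length = best ∧ ¬ st.2.contains r then (st.1 ++ [r], PySem.Set.add st.2 r) else st

def EnUzunArtanListe_alt (liste : List Int) : List (List Int) :=
  let n : Int := liste.length
  let breaks : List Int :=
    [0] ++ (PySem.List.pyRange 1 n 1).filter
      (fun i => PySem.List.pyGetD liste i 0 ≤ PySem.List.pyGetD liste (i - 1) 0) ++ [n]
  let segs := (breaks.zip breaks.tail).map (fun p => PySem.List.slice liste (some p.1) (some p.2))
  let runs := segs.dropLast.filter (fun s => s.length > 1) ++ [segs.getLastD []]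
  let s2 := runs.foldl pvStep2B ((runs.headD []).length, [])
  let s3 := runs.foldl (pvStep3B s2.1) (s2.2, PySem.Set.ofList s2.2)
  s3.1

-- ===== PRECONDITION & SPEC =====
-- A evaluates liste[0] before its loop: on [] it raises IndexError, so [] is excluded.
def Pre_EnUzunArtanListe (liste : List Int) : Prop := liste ≠ []
instance (liste : List Int) : Decidable (Pre_EnUzunArtanListe liste) := by
  unfold Pre_EnUzunArtanListe; infer_instance
def pvWitness_EnUzunArtanListe : List Int := ([3, 1, 2, 5, 4])

def Spec_EnUzunArtanListe (liste : List Int) (out : List (List Int)) : Prop := out = EnUzunArtanListe_alt liste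
instance (liste : List Int) (out : List (List Int)) : Decidable (Spec_EnUzunArtanListe liste out) := by
  unfold Spec_EnUzunArtanListe; infer_instance

-- ===== CLAIM (what is proved, stated in full; the proofs are below) =====
def Claim_equal_EnUzunArtanListe : Prop := ∀ (liste : List Int), Dom_EnUzunArtanListe liste → Pre_EnUzunArtanListe liste → Spec_EnUzunArtanListe liste (EnUzunArtanListe liste)

-- ===== LEMMAS AND PROOFS =====

-- proof-side view of B's run construction: break positions, then consecutive slices
def pvIsBrk (liste : List Int) (i : Int) : Bool :=
  PySem.List.pyGetD liste i 0 ≤ PySem.List.pyGetD liste (i - 1) 0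

def pvBrks (liste : List Int) (m : Int) : List Int :=
  0 :: (PySem.List.pyRange 1 m 1).filter (fun i => pvIsBrk liste i)

def pvSegs (liste : List Int) (bs : List Int) : List (List Int) :=
  (bs.zip bs.tail).map (fun p => PySem.List.slice liste (some p.1) (some p.2))

theorem pvSegs_append (liste : List Int) (bs : List Int) (c : Int) (h : bs ≠ []) :
    pvSegs liste (bs ++ [c]) =
      pvSegs liste bs ++ [PySem.List.slice liste (some (bs.getLastD 0)) (some c)] := by
  induction bs with
  | nil => exact absurd rfl h
  | cons a t ih =>
    cases t with
    | nil => simp [pvSegs]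
    | cons b t' =>
      have := ih (by simp)
      simp [pvSegs] at this ⊢
      simpa using this

theorem pvPhase2 (runs : List (List Int)) (a : Nat) (acc : List (List Int)) :
    runs.foldl pvStep2A ((a : Int), acc) =
      (((runs.foldl pvStep2B (a, acc)).1 : Int), (runs.foldl pvStep2B (a, acc)).2) := by
  induction runs generalizing a acc with
  | nil => rfl
  | cons r t ih =>
    simp only [List.foldl_cons, pvStep2A, pvStep2B]
    by_cases h : a < r.length
    · rw [if_pos (by exact_mod_cast h), if_pos h]; exact ih _ _
    · rw [if_neg (by exact_mod_cast h), if_neg h]; exact ih _ _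

theorem pvPhase3 (best : Nat) (runs : List (List Int)) (acc : List (List Int))
    (seen : PySem.Set (List Int)) (hseen : ∀ r, r ∈ seen ↔ r ∈ acc) :
    runs.foldl (pvStep3A (best : Int)) acc = (runs.foldl (pvStep3B best) (acc, seen)).1 := by
  induction runs generalizing acc seen with
  | nil => rfl
  | cons r t ih =>
    simp only [List.foldl_cons, pvStep3A, pvStep3B]
    by_cases h : r ∈ acc
    · rw [if_neg (fun hk => hk.1 h), if_neg (by simp [PySem.Set.contains, h, hseen r])]
      exact ih _ _ hseen
    · by_cases hl : r.length = best
      · rw [if_pos ⟨h, by exact_mod_cast hl⟩, if_pos ⟨hl, by simp [PySem.Set.contains, h, hseen r]⟩]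
        have hadd : PySem.Set.add seen r = seen ++ [r] := by
          simp [PySem.Set.add, PySem.Set.contains, h, hseen r]
        refine ih _ _ (fun x => ?_)
        simp [hadd, hseen x]
      · rw [if_neg (by rintro ⟨_, hh⟩; exact hl (by exact_mod_cast hh)),
            if_neg (by rintro ⟨hh, _⟩; exact hl hh)]
        exact ih _ _ hseen

theorem pvSliceSnoc (liste : List Int) (a m : Nat) (ham : a ≤ m) (hm : m < liste.length) :
    PySem.List.slice liste (some (a:Int)) (some (m:Int)) ++ [liste[m]] =
      PySem.List.slice liste (some (a:Int)) (some ((m:Int)+1)) := by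
  have hc : ((m:Int)+1) = ((m+1 : Nat) : Int) := by push_cast; ring
  rw [hc, PySem.List.slice_natCast, PySem.List.slice_natCast]
  have h1 : m + 1 - a = (m - a) + 1 := by omega
  rw [h1, List.take_add_one]
  have h2 : (liste.drop a)[m - a]? = some liste[m] := by
    rw [List.getElem?_drop]
    have h3 : a + (m - a) = m := by omega
    rw [h3, List.getElem?_eq_getElem hm]
  simp [h2]

theorem pvSliceSingle (liste : List Int) (m : Nat) (hm : m < liste.length) :
    PySem.List.slice liste (some (m:Int)) (some ((m:Int)+1)) = [liste[m]] := by
  have hc : ((m:Int)+1) = ((m+1 : Nat) : Int) := by push_cast; ring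
  rw [hc, PySem.List.slice_natCast]
  have h1 : m + 1 - m = 1 := by omega
  rw [h1]
  simp [List.take_one, List.head?_drop, List.getElem?_eq_getElem hm]

theorem pvGetDAt (liste : List Int) (m : Nat) (hm : m < liste.length) :
    PySem.List.pyGetD liste (m:Int) 0 = liste[m] := by
  simp [PySem.List.pyGetD_natCast, List.getD_eq_getElem?_getD, List.getElem?_eq_getElem hm]

theorem pvPhase1 (liste : List Int) (hne : liste ≠ []) (m : Nat) (h1 : 1 ≤ m)
    (h2 : m ≤ liste.length) :
    ∃ a : Nat, a < m ∧ (pvBrks liste (m:Int)).getLastD 0 = (a:Int) ∧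
      (PySem.List.pyRange 1 (m:Int) 1).foldl (pvStepA liste) ([], [liste.headD 0]) =
        ((pvSegs liste (pvBrks liste (m:Int))).filter (fun s => s.length > 1),
         PySem.List.slice liste (some (a:Int)) (some (m:Int))) := by
  induction m, h1 using Nat.le_induction with
  | base =>
    refine ⟨0, by omega, by simp [pvBrks, PySem.List.pyRange_one_eq_nil], ?_⟩
    rw [PySem.List.pyRange_one_eq_nil (by norm_num)]
    simp only [List.foldl_nil]
    rw [PySem.List.slice_natCast]
    cases liste with
    | nil => exact absurd rfl hne
    | cons x r => simp [pvBrks, pvSegs, PySem.List.pyRange_one_eq_nil]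
  | succ m hm ih =>
    obtain ⟨a, ha, hlast, hfold⟩ := ih (by omega)
    have hmlt : m < liste.length := by omega
    have hcast : ((m+1 : Nat) : Int) = (m:Int) + 1 := by push_cast; ring
    have hrange : PySem.List.pyRange 1 ((m+1:Nat):Int) 1 =
        PySem.List.pyRange 1 (m:Int) 1 ++ [(m:Int)] := by
      rw [hcast, PySem.List.pyRange_one_succ_right (by exact_mod_cast hm)]
    have hbrks : pvBrks liste ((m+1:Nat):Int) =
        pvBrks liste (m:Int) ++ (if pvIsBrk liste (m:Int) then [(m:Int)] else []) := by
      simp only [pvBrks, hrange, List.filter_append]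
      by_cases hb : pvIsBrk liste (m:Int) <;> simp [hb]
    rw [hrange, List.foldl_append, hfold]
    simp only [List.foldl_cons, List.foldl_nil]
    by_cases hb : pvIsBrk liste (m:Int)
    · -- break at m: temp flushed (if long enough), new run starts at m
      refine ⟨m, by omega, ?_, ?_⟩
      · rw [hbrks, if_pos hb]
        have : pvBrks liste (m:Int) ++ [(m:Int)] =
            (pvBrks liste (m:Int)) ++ [(m:Int)] := rfl
        simp
      · have hsegs : pvSegs liste (pvBrks liste ((m+1:Nat):Int)) =
            pvSegs liste (pvBrks liste (m:Int)) ++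
              [PySem.List.slice liste (some (a:Int)) (some (m:Int))] := by
          rw [hbrks, if_pos hb, pvSegs_append liste _ _ (by simp [pvBrks]), hlast]
        have hcond : ¬ (PySem.List.pyGetD liste (m:Int) 0 > PySem.List.pyGetD liste ((m:Int) - 1) 0) := by
          simp only [pvIsBrk, decide_eq_true_eq] at hb; omega
        rw [hsegs]
        simp only [pvStepA, if_neg hcond, List.filter_append]
        by_cases hlen : (PySem.List.slice liste (some (a:Int)) (some (m:Int))).length > 1
        · rw [if_pos hlen]
          simp [hlen, hcast, List.getElem?_eq_getElem hmlt, pvSliceSingle liste m hmlt]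
        · rw [if_neg hlen]
          simp [hlen, hcast, List.getElem?_eq_getElem hmlt, pvSliceSingle liste m hmlt]
    · -- still increasing: run extends
      refine ⟨a, by omega, ?_, ?_⟩
      · rw [hbrks, if_neg hb]; simpa using hlast
      · have hcond : PySem.List.pyGetD liste (m:Int) 0 > PySem.List.pyGetD liste ((m:Int) - 1) 0 := by
          simp only [pvIsBrk, decide_eq_true_eq, not_le] at hb; omega
        simp only [pvStepA, if_pos hcond]
        rw [hbrks, if_neg hb]
        simp only [List.append_nil]
        rw [pvGetDAt liste m hmlt, pvSliceSnoc liste a m (by omega) hmlt, hcast]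

theorem pvPhases23 (R : List (List Int)) :
    R.foldl (pvStep3A (R.foldl pvStep2A ((((R.headD []).length : Nat) : Int), [])).1)
        (R.foldl pvStep2A ((((R.headD []).length : Nat) : Int), [])).2 =
      (R.foldl (pvStep3B (R.foldl pvStep2B ((R.headD []).length, [])).1)
        ((R.foldl pvStep2B ((R.headD []).length, [])).2,
         PySem.Set.ofList (R.foldl pvStep2B ((R.headD []).length, [])).2)).1 := by
  rw [pvPhase2 R (R.headD []).length []]
  exact pvPhase3 _ R _ _ (fun r => by simp [PySem.Set.mem_ofList])

theorem pvMain (x0 : Int) (rest : List Int) :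
    EnUzunArtanListe (x0 :: rest) = EnUzunArtanListe_alt (x0 :: rest) := by
  obtain ⟨a, ha, hlast, hfold⟩ :=
    pvPhase1 (x0 :: rest) (by simp) (x0 :: rest).length (by simp) le_rfl
  have hbrne : pvBrks (x0 :: rest) (((x0 :: rest).length : Nat) : Int) ≠ [] := by simp [pvBrks]
  have hsegs := pvSegs_append (x0 :: rest) (pvBrks (x0 :: rest) (((x0 :: rest).length : Nat) : Int))
      (((x0 :: rest).length : Nat) : Int) hbrne
  rw [hlast] at hsegs
  simp only [List.headD_cons] at hfold
  simp only [EnUzunArtanListe, EnUzunArtanListe_alt]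
  rw [hfold]
  simp only [pvSegs, pvBrks, pvIsBrk, List.cons_append, List.nil_append] at hsegs ⊢
  rw [hsegs]
  simp only [List.dropLast_concat, List.getLastD_concat]
  exact pvPhases23 _

-- ===== VERDICT (by name: the statement is the Claim_ definition above) =====
theorem EnUzunArtanListe_spec : Claim_equal_EnUzunArtanListe := by
  intro liste _ hpre
  unfold Spec_EnUzunArtanListe
  cases liste with
  | nil => exact absurd rfl hpre
  | cons x0 rest => exact pvMain x0 rest
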